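-- pv_equiv track=rewrite | github.com/ilinum/advent-of-code | 2024/day5/solution.py | is_valid_ordering
-- ===== SOURCE A (Python) =====
-- def is_valid_ordering(full_prereqs: dict[int, set[int]], nums: list[int]) -> bool:
--     prereqs = {}
--     num_set = set(nums)
--     for n, prev_nums in full_prereqs.items():
--         if n in num_set:
--             prereqs[n] = set()
--             for pn in prev_nums:
--                 if pn in num_set:
--                     prereqs[n].add(pn)
--
--     for num in nums:
--         if len(prereqs.get(num, set())) > 0:
--             return False
--         for k in prereqs:
--             if num in prereqs[k]:
--                 prereqs[k].remove(num)
--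
--     return True
-- ===== SOURCE B (Python) =====
-- def is_valid_ordering(full_prereqs: dict[int, set[int]], nums: list[int]) -> bool:
--     num_set = set(nums)
--     seen = set()
--     for num in nums:
--         for pn in full_prereqs.get(num, ()):
--             if pn in num_set and pn not in seen:
--                 return False
--         seen.add(num)
--     return True
-- ===== Notes on version B (the rewrite author's own statement) =====
-- stated objective: faster
-- what changed: Instead of building mutable per-number prereq sets and, for each processed number, scanning every key to delete it from those sets, B keeps one growing 'seen' set and for each number just checks its own prerequisites (filtered by membership in num_set) against 'seen'; Pre_ only excludes association lists with duplicate keys, which cannot represent a Python dict.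
import Mathlib
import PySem

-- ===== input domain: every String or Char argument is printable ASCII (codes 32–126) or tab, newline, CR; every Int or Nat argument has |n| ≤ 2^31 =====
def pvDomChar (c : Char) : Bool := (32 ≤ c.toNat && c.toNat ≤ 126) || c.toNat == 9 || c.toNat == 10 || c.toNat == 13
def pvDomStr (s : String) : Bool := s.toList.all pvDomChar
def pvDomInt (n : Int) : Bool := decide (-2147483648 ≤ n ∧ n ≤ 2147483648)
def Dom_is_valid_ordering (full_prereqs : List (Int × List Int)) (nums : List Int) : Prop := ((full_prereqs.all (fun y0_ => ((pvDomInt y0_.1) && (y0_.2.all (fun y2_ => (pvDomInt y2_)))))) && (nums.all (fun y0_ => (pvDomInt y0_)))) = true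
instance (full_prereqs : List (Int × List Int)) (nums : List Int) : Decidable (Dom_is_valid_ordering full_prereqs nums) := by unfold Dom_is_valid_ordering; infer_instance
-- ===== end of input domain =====

-- B replaces A's per-number scan over all prereq-set keys with a single growing 'seen' set checked
-- against each number's own (num_set-filtered) prerequisites; objective: faster (removes the inner
-- scan over all keys). Pre_ only excludes association lists with duplicate keys (not a Python dict).


-- ===== PORT A =====
-- first loop: build prereqs[n] = {pn in prev_nums | pn in num_set} for keys n in num_set
def pvBuildStep (num_set : PySem.Set Int) (pr : PySem.Dict Int (PySem.Set Int)) (p : Int × List Int) : PySem.Dict Int (PySem.Set Int) :=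
  if PySem.Set.contains num_set p.1 then
    p.2.foldl
      (fun pr pn => if PySem.Set.contains num_set pn then
          pr.modify p.1 PySem.Set.empty (fun s => PySem.Set.add s pn) else pr)
      (pr.insert p.1 PySem.Set.empty)
  else pr

-- inner loop of the second pass: 'for k in prereqs: if num in prereqs[k]: prereqs[k].remove(num)'
-- (remove is guarded by the membership test, so it never raises; it is Set.discard here)
def pvRemoveAll (num : Int) (pr : PySem.Dict Int (PySem.Set Int)) : PySem.Dict Int (PySem.Set Int) :=
  pr.keys.foldl
    (fun pr k => if PySem.Set.contains (pr.getD k PySem.Set.empty) num then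
        pr.modify k PySem.Set.empty (fun s => PySem.Set.discard s num) else pr)
    pr

-- second loop with its early 'return False'
def pvCheckLoop (pr : PySem.Dict Int (PySem.Set Int)) : List Int → Bool
  | [] => true
  | num :: rest =>
    if PySem.Set.len (pr.getD num PySem.Set.empty) > 0 then false
    else pvCheckLoop (pvRemoveAll num pr) rest

def is_valid_ordering (full_prereqs : List (Int × List Int)) (nums : List Int) : Bool :=
  let num_set := PySem.Set.ofList nums
  let prereqs := full_prereqs.foldl (pvBuildStep num_set) PySem.Dict.empty
  pvCheckLoop prereqs nums

-- ===== PORT B =====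
-- 'for num in nums: for pn in full_prereqs.get(num, ()): if pn in num_set and pn not in seen: return False; seen.add(num)'
def pvAltLoop (full_prereqs : PySem.Dict Int (List Int)) (num_set : PySem.Set Int) (seen : PySem.Set Int) : List Int → Bool
  | [] => true
  | num :: rest =>
    if (full_prereqs.getD num []).any
        (fun pn => PySem.Set.contains num_set pn && !(PySem.Set.contains seen pn)) then false
    else pvAltLoop full_prereqs num_set (PySem.Set.add seen num) rest

def is_valid_ordering_alt (full_prereqs : List (Int × List Int)) (nums : List Int) : Bool :=
  let num_set := PySem.Set.ofList nums
  pvAltLoop (PySem.Dict.mk full_prereqs) num_set PySem.Set.empty nums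

-- ===== PRECONDITION & SPEC =====
-- Pre_ excludes association lists with duplicate keys: a Python dict cannot contain them, so no Python
-- input is excluded; on such lists A's port reads the last occurrence and B's the first, an artefact of
-- the dict-as-association-list encoding.
def Pre_is_valid_ordering (full_prereqs : List (Int × List Int)) (nums : List Int) : Prop :=
  (full_prereqs.map Prod.fst).Nodup
instance (full_prereqs : List (Int × List Int)) (nums : List Int) : Decidable (Pre_is_valid_ordering full_prereqs nums) := by unfold Pre_is_valid_ordering; infer_instance
def pvWitness_is_valid_ordering : (List (Int × List Int)) × List Int := ([(2, [1])], [1, 2])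

def Spec_is_valid_ordering (full_prereqs : List (Int × List Int)) (nums : List Int) (out : Bool) : Prop := out = is_valid_ordering_alt full_prereqs nums
instance (full_prereqs : List (Int × List Int)) (nums : List Int) (out : Bool) : Decidable (Spec_is_valid_ordering full_prereqs nums out) := by unfold Spec_is_valid_ordering; infer_instance

-- ===== CLAIM (what is proved, stated in full; the proofs are below) =====
def Claim_equal_is_valid_ordering : Prop := ∀ (full_prereqs : List (Int × List Int)) (nums : List Int), Dom_is_valid_ordering full_prereqs nums → Pre_is_valid_ordering full_prereqs nums → Spec_is_valid_ordering full_prereqs nums (is_valid_ordering full_prereqs nums)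

-- ===== LEMMAS AND PROOFS =====

-- value at key k' after A's inner add-loop at fixed key k
lemma pvBuildInner (c : Int → Bool) (l : List Int) (k k' : Int) (d : PySem.Dict Int (PySem.Set Int)) :
    (l.foldl (fun pr pn => if c pn then pr.modify k PySem.Set.empty (fun s => PySem.Set.add s pn) else pr) d).getD k' PySem.Set.empty
      = if k' = k then (l.filter c).foldl PySem.Set.add (d.getD k PySem.Set.empty)
        else d.getD k' PySem.Set.empty := by
  induction l generalizing d with
  | nil => by_cases hk : k' = k <;> simp [hk]
  | cons pn l ih =>
    simp only [List.foldl_cons, List.filter_cons]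
    by_cases hc : c pn = true
    · rw [if_pos hc, if_pos hc, ih]
      by_cases hk : k' = k <;> simp [hk, PySem.Dict.getD_modify]
    · rw [if_neg hc, if_neg hc, ih]

-- value at key k after A's whole build loop (keys Nodup)
lemma pvBuildGetD (ns : PySem.Set Int) (fp : List (Int × List Int)) (d : PySem.Dict Int (PySem.Set Int)) (k : Int)
    (hnd : (fp.map Prod.fst).Nodup) :
    (fp.foldl (pvBuildStep ns) d).getD k PySem.Set.empty =
      if ((PySem.Dict.mk fp).contains k && PySem.Set.contains ns k) = true
      then PySem.Set.ofList (((PySem.Dict.mk fp).getD k []).filter (PySem.Set.contains ns))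
      else d.getD k PySem.Set.empty := by
  induction fp generalizing d with
  | nil => rfl
  | cons p rest ih =>
    obtain ⟨k0, l0⟩ := p
    simp only [List.map_cons, List.nodup_cons] at hnd
    obtain ⟨hk0, hrest⟩ := hnd
    simp only [List.foldl_cons]
    rw [ih _ hrest]
    by_cases hk : k0 = k
    · subst hk
      have hcrest : (PySem.Dict.mk rest).contains k0 = false := by
        rw [Bool.eq_false_iff]
        intro h
        exact hk0 (by simpa [PySem.Dict.keys_mk] using (PySem.Dict.contains_iff_mem_keys _ _).mp h)
      have hcons : (PySem.Dict.mk ((k0, l0) :: rest)).contains k0 = true := by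
        rw [PySem.Dict.contains_iff_mem_keys, PySem.Dict.keys_mk]
        exact List.mem_cons_self ..
      have hgd : (PySem.Dict.mk ((k0, l0) :: rest)).getD k0 [] = l0 := by
        rw [PySem.Dict.getD_eq_get?_getD, PySem.Dict.get?_mk_cons]
        simp
      rw [hcrest, hcons, hgd]
      simp only [Bool.false_and, Bool.false_eq_true, if_false, Bool.true_and]
      unfold pvBuildStep
      by_cases hc : PySem.Set.contains ns k0 = true
      · rw [if_pos hc, if_pos hc, pvBuildInner, if_pos rfl, PySem.Dict.getD_insert,
          if_pos rfl, PySem.Set.ofList_eq_foldl]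
        rfl
      · rw [if_neg hc, if_neg hc]
    · have hbk : (k0 == k) = false := by simpa using hk
      have hd1 : (pvBuildStep ns d (k0, l0)).getD k PySem.Set.empty = d.getD k PySem.Set.empty := by
        unfold pvBuildStep
        by_cases hc : PySem.Set.contains ns k0 = true
        · rw [if_pos hc, pvBuildInner, if_neg (fun h => hk h.symm), PySem.Dict.getD_insert,
            if_neg (fun h => hk h.symm)]
        · rw [if_neg hc]
      have hcc : (PySem.Dict.mk ((k0, l0) :: rest)).contains k = (PySem.Dict.mk rest).contains k := by
        rw [PySem.Dict.contains_eq_isSome_get?, PySem.Dict.contains_eq_isSome_get?,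
          PySem.Dict.get?_mk_cons, hbk]
        simp
      have hgd : (PySem.Dict.mk ((k0, l0) :: rest)).getD k [] = (PySem.Dict.mk rest).getD k [] := by
        rw [PySem.Dict.getD_eq_get?_getD, PySem.Dict.getD_eq_get?_getD,
          PySem.Dict.get?_mk_cons, hbk]
        simp
      rw [hcc, hgd, hd1]

-- membership in the value at k after the removal fold over an arbitrary key list
lemma pvRemoveFold (num : Int) (ks : List Int) (d : PySem.Dict Int (PySem.Set Int)) (k pn : Int) :
    pn ∈ (ks.foldl (fun pr k' => if PySem.Set.contains (pr.getD k' PySem.Set.empty) num then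
            pr.modify k' PySem.Set.empty (fun s => PySem.Set.discard s num) else pr) d).getD k PySem.Set.empty
      ↔ pn ∈ d.getD k PySem.Set.empty ∧ (k ∈ ks → pn ≠ num) := by
  induction ks generalizing d with
  | nil => simp
  | cons k0 ks ih =>
    simp only [List.foldl_cons]
    rw [ih]
    have hd1 : ∀ q, q ∈ ((if PySem.Set.contains (d.getD k0 PySem.Set.empty) num then
          d.modify k0 PySem.Set.empty (fun s => PySem.Set.discard s num) else d)).getD k PySem.Set.empty
        ↔ q ∈ d.getD k PySem.Set.empty ∧ (k = k0 → q ≠ num) := by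
      intro q
      by_cases hc : PySem.Set.contains (d.getD k0 PySem.Set.empty) num = true
      · rw [if_pos hc, PySem.Dict.getD_modify]
        by_cases hk : k = k0 <;> simp [hk, PySem.Set.mem_discard]
      · have hnm : num ∉ d.getD k0 PySem.Set.empty := by
          intro h; exact hc ((PySem.Set.contains_iff _ _).mpr h)
        rw [if_neg hc]
        by_cases hk : k = k0
        · subst hk
          exact ⟨fun h => ⟨h, fun _ hq => hnm (hq ▸ h)⟩, fun h => h.1⟩
        · simp [hk]
    constructor
    · rintro ⟨h1, h2⟩
      rcases (hd1 pn).mp h1 with ⟨h3, h4⟩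
      refine ⟨h3, fun hm => ?_⟩
      rcases List.mem_cons.mp hm with rfl | hmem
      · exact h4 rfl
      · exact h2 hmem
    · rintro ⟨h1, h2⟩
      exact ⟨(hd1 pn).mpr ⟨h1, fun hk => h2 (hk ▸ List.mem_cons_self ..)⟩,
        fun hm => h2 (List.mem_cons_of_mem _ hm)⟩

lemma pvRemoveAll_mem (num : Int) (pr : PySem.Dict Int (PySem.Set Int)) (k pn : Int) :
    pn ∈ (pvRemoveAll num pr).getD k PySem.Set.empty
      ↔ pn ∈ pr.getD k PySem.Set.empty ∧ pn ≠ num := by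
  unfold pvRemoveAll
  rw [pvRemoveFold]
  by_cases hk : k ∈ pr.keys
  · simp [hk]
  · have hempty : pr.getD k PySem.Set.empty = PySem.Set.empty :=
      PySem.Dict.getD_of_not_contains _ _ (by
        by_contra h
        exact hk ((PySem.Dict.contains_iff_mem_keys _ _).mp (by simpa using h)))
    rw [hempty]
    simp [PySem.Set.empty]

-- the two main loops agree under the invariant relating A's mutable dict to B's seen set
lemma pvLoopEq (fp : List (Int × List Int)) (ns : PySem.Set Int) (ks : List Int)
    (pr : PySem.Dict Int (PySem.Set Int)) (seen : PySem.Set Int)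
    (hks : ∀ k ∈ ks, PySem.Set.contains ns k = true)
    (hinv : ∀ k pn, pn ∈ pr.getD k PySem.Set.empty ↔
      (PySem.Set.contains ns k = true ∧ pn ∈ (PySem.Dict.mk fp).getD k [] ∧
        PySem.Set.contains ns pn = true ∧ pn ∉ seen)) :
    pvCheckLoop pr ks = pvAltLoop (PySem.Dict.mk fp) ns seen ks := by
  induction ks generalizing pr seen with
  | nil => rfl
  | cons num rest ih =>
    have hnum : PySem.Set.contains ns num = true := hks num (List.mem_cons_self ..)
    have hcond : (PySem.Set.len (pr.getD num PySem.Set.empty) > 0)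
        ↔ ((PySem.Dict.mk fp).getD num []).any
            (fun pn => PySem.Set.contains ns pn && !(PySem.Set.contains seen pn)) = true := by
      have hlen : (PySem.Set.len (pr.getD num PySem.Set.empty) > 0)
          ↔ ∃ pn, pn ∈ pr.getD num PySem.Set.empty := by
        simp only [gt_iff_lt, PySem.Set.len]
        cases pr.getD num PySem.Set.empty <;> simp
      rw [hlen, List.any_eq_true]
      constructor
      · rintro ⟨pn, hpn⟩
        rcases (hinv num pn).mp hpn with ⟨_, h2, h3, h4⟩
        refine ⟨pn, h2, ?_⟩
        rw [Bool.and_eq_true, Bool.not_eq_true']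
        refine ⟨h3, ?_⟩
        rw [← Bool.not_eq_true]
        exact fun h => h4 ((PySem.Set.contains_iff _ _).mp h)
      · rintro ⟨pn, h2, hb⟩
        rw [Bool.and_eq_true, Bool.not_eq_true'] at hb
        refine ⟨pn, (hinv num pn).mpr ⟨hnum, h2, hb.1, fun hm => ?_⟩⟩
        rw [(PySem.Set.contains_iff _ _).mpr hm] at hb
        exact absurd hb.2 (by simp)
    unfold pvCheckLoop pvAltLoop
    by_cases hc : PySem.Set.len (pr.getD num PySem.Set.empty) > 0
    · rw [if_pos hc, if_pos (hcond.mp hc)]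
    · rw [if_neg hc, if_neg (fun h => hc (hcond.mpr h))]
      apply ih
      · exact fun k hk => hks k (List.mem_cons_of_mem _ hk)
      · intro k pn
        rw [pvRemoveAll_mem, hinv]
        have hadd : ∀ q : Int, q ∈ PySem.Set.add seen num ↔ q ∈ seen ∨ q = num :=
          fun q => PySem.Set.mem_add seen num q
        constructor
        · rintro ⟨⟨h1, h2, h3, h4⟩, h5⟩
          exact ⟨h1, h2, h3, fun h => ((hadd pn).mp h).elim h4 h5⟩
        · rintro ⟨h1, h2, h3, h4⟩
          exact ⟨⟨h1, h2, h3, fun h => h4 ((hadd pn).mpr (Or.inl h))⟩,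
            fun h => h4 ((hadd pn).mpr (Or.inr h))⟩

-- ===== VERDICT (by name: the statement is the Claim_ definition above) =====
theorem is_valid_ordering_spec : Claim_equal_is_valid_ordering := by
  intro fp nums _hdom hpre
  unfold Spec_is_valid_ordering is_valid_ordering is_valid_ordering_alt
  apply pvLoopEq
  · intro k hk
    exact (PySem.Set.contains_iff _ _).mpr ((PySem.Set.mem_ofList _ _).mpr hk)
  · intro k pn
    rw [pvBuildGetD _ _ _ _ hpre]
    by_cases hck : (PySem.Dict.mk fp).contains k = true
    · by_cases hc : PySem.Set.contains (PySem.Set.ofList nums) k = true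
      · rw [if_pos (by rw [hck, hc]; rfl)]
        constructor
        · intro hmem
          have hf := List.mem_filter.mp ((PySem.Set.mem_ofList _ _).mp hmem)
          exact ⟨hc, hf.1, hf.2, by simp [PySem.Set.empty]⟩
        · rintro ⟨_, h2, h3, _⟩
          exact (PySem.Set.mem_ofList _ _).mpr (List.mem_filter.mpr ⟨h2, h3⟩)
      · rw [if_neg (fun h => hc (by rw [Bool.and_eq_true] at h; exact h.2)), PySem.Dict.getD_empty]
        have hkn : k ∉ nums := fun hm =>
          hc ((PySem.Set.contains_iff _ _).mpr ((PySem.Set.mem_ofList _ _).mpr hm))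
        simp [PySem.Set.empty, hkn]
    · have hgd : (PySem.Dict.mk fp).getD k [] = [] :=
        PySem.Dict.getD_of_not_contains _ _ (Bool.eq_false_iff.mpr hck)
      rw [if_neg (fun h => hck (by rw [Bool.and_eq_true] at h; exact h.1)), PySem.Dict.getD_empty, hgd]
      simp [PySem.Set.empty]
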